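-- pv_equiv track=rewrite | github.com/xliu241/rosalindProblems | Bioinfo-algorithms-main/inconsistence_character.py | c1_c0
-- ===== SOURCE A (Python) =====
-- def c1_c0(character):
--     c1=[]
--     c0=[]
--     for i in range(len(character)):
--         if character[i] == '1':
--             c1.append(i)
--         else:
--             c0.append(i)
--     return set(c1), set(c0)
-- ===== SOURCE B (Python) =====
-- def c1_c0(character):
--     c1 = set()
--     pos = character.find('1')
--     while pos != -1:
--         c1.add(pos)
--         pos = character.find('1', pos + 1)
--     c0 = set(range(len(character))) - c1
--     return c1, c0
-- ===== Notes on version B (the rewrite author's own statement) =====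
-- stated objective: alternative
-- what changed: Instead of an index loop with an if/else partition into two appended lists, B collects c1 with a while loop that jumps between occurrences via str.find('1', pos+1) and derives c0 as set(range(n)) - c1.
import Mathlib
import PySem

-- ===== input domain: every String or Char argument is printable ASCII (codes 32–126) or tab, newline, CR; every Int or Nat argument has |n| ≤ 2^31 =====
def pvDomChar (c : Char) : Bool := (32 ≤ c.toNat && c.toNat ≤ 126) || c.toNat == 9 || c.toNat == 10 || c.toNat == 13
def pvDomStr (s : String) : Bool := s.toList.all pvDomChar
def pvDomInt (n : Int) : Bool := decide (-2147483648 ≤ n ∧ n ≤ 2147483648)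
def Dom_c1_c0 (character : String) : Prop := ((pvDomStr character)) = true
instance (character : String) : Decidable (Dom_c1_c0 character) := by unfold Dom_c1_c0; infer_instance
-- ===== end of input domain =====

-- B replaces A's per-index if/else partition by a while loop over str.find('1', pos+1)
-- that jumps between occurrences to collect c1, then derives c0 as set(range(n)) - c1;
-- same O(n) cost, a genuinely different traversal.

-- ===== PORT A =====
-- literal port of A: loop over range(len(character)), append i to c1 or c0, return (set(c1), set(c0))
def c1_c0 (character : String) : List Int × List Int :=
  let cs := character.toList
  let p := (PySem.List.pyRange 0 (cs.length : Int) 1).foldl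
    (fun (acc : List Int × List Int) i =>
      if PySem.List.pyGetD cs i ' ' == '1' then (acc.1 ++ [i], acc.2) else (acc.1, acc.2 ++ [i]))
    ([], [])
  (PySem.Set.ofList p.1, PySem.Set.ofList p.2)

-- ===== PORT B =====
-- facts the while-loop's termination needs (cited by name in decreasing_by):
-- a successful find('1', start) lands at an index in [start, len)
theorem pvFindFacts (cs : List Char) (start : Nat)
    (h : PySem.Chars.findFrom cs ['1'] (start : Int) none ≠ -1) :
    (start : Int) ≤ PySem.Chars.findFrom cs ['1'] (start : Int) none ∧
    (PySem.Chars.findFrom cs ['1'] (start : Int) none).toNat < cs.length ∧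
    start ≤ cs.length := by
  have hle : start ≤ cs.length := by
    by_contra hgt
    push_neg at hgt
    apply h
    unfold PySem.Chars.findFrom
    simp only []
    rw [if_pos]
    rw [if_neg (show ¬ ((start : Int) < 0) by omega)]
    exact_mod_cast hgt
  obtain ⟨h1, h2, _⟩ := PySem.Chars.findFrom_natCast_spec cs ['1'] start hle h
  refine ⟨h1, ?_, hle⟩
  by_contra hlt
  push_neg at hlt
  rw [List.drop_eq_nil_of_le hlt] at h2
  simp at h2

-- literal port of B's while loop: pos = find('1', start); while pos != -1: c1.add(pos); pos = find('1', pos+1)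
def pvWhile (cs : List Char) (start : Nat) (acc : List Int) : List Int :=
  let pos := PySem.Chars.findFrom cs ['1'] (start : Int) none
  if h : pos = -1 then acc
  else pvWhile cs (pos.toNat + 1) (PySem.Set.add acc pos)
termination_by cs.length + 1 - start
decreasing_by
  obtain ⟨h1, h2, h3⟩ := pvFindFacts cs start h
  omega

-- literal port of B: c1 from the find loop (starting with character.find('1')); c0 = set(range(len)) - c1
def c1_c0_alt (character : String) : List Int × List Int :=
  let cs := character.toList
  let c1 : PySem.Set Int := pvWhile cs 0 PySem.Set.empty
  let c0 : PySem.Set Int :=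
    PySem.Set.diff (PySem.Set.ofList (PySem.List.pyRange 0 (cs.length : Int) 1)) c1
  (c1, c0)

-- ===== PRECONDITION & SPEC =====
def Spec_c1_c0 (character : String) (out : List Int × List Int) : Prop := out = c1_c0_alt character
instance (character : String) (out : List Int × List Int) : Decidable (Spec_c1_c0 character out) := by unfold Spec_c1_c0; infer_instance

-- ===== CLAIM (what is proved, stated in full; the proofs are below) =====
def Claim_equal_c1_c0 : Prop := ∀ (character : String), Dom_c1_c0 character → Spec_c1_c0 character (c1_c0 character)

-- ===== LEMMAS AND PROOFS =====

-- A's loop partitions: the fold appends the '1'-indices to a1 and the other indices to a0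
theorem pvFoldPartition (l : List Int) (pred : Int → Bool) (a1 a0 : List Int) :
    l.foldl
      (fun (acc : List Int × List Int) i =>
        if pred i then (acc.1 ++ [i], acc.2) else (acc.1, acc.2 ++ [i]))
      (a1, a0)
    = (a1 ++ l.filter pred, a0 ++ l.filter (fun i => !(pred i))) := by
  induction l generalizing a1 a0 with
  | nil => simp
  | cons hd tl ih =>
    by_cases h : pred hd = true
    · rw [List.foldl_cons, if_pos h, ih]; simp [h]
    · rw [List.foldl_cons, if_neg h, ih]; simp [h]

-- a filtered range of step 1 has no duplicates
theorem pvNodupFilterRange (a b : Int) (q : Int → Bool) :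
    ((PySem.List.pyRange a b 1).filter q).Nodup :=
  (((PySem.List.pairwise_lt_pyRange_one a b).sublist List.filter_sublist).imp
    (fun hlt => ne_of_lt hlt))

-- membership of '1' as a sublist/prefix, read off the character at an index
theorem pvPrefixOne (cs : List Char) (k : Nat) (hk : k < cs.length) :
    (['1'] <+: cs.drop k) ↔ cs[k] = '1' := by
  constructor
  · rintro ⟨t, ht⟩
    have h0 : cs[k + 0]? = some '1' := by rw [← List.getElem?_drop, ← ht]; rfl
    rw [List.getElem?_eq_getElem (by omega)] at h0
    simpa using h0
  · intro h
    refine ⟨cs.drop (k + 1), ?_⟩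
    rw [← List.getElem_cons_drop hk, h]
    rfl

-- the while loop with accumulator acc (all below start) produces acc ++ the '1'-indices ≥ start
theorem pvWhileEq (cs : List Char) (start : Nat) (acc : List Int) :
    (∀ x ∈ acc, x < (start : Int)) →
    pvWhile cs start acc
      = acc ++ (PySem.List.pyRange (start : Int) (cs.length : Int) 1).filter
          (fun j => PySem.List.pyGetD cs j ' ' == '1') := by
  induction start, acc using pvWhile.induct cs with
  | case1 start acc pos hpos =>
    intro _hacc
    -- find returned -1: no '1' at or after start
    rw [pvWhile]
    rw [dif_pos hpos]
    have hfe : (PySem.List.pyRange (start : Int) (cs.length : Int) 1).filter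
        (fun j => PySem.List.pyGetD cs j ' ' == '1') = [] := by
      rw [List.filter_eq_nil_iff]
      intro j hj
      rw [PySem.List.mem_pyRange_one] at hj
      by_cases hsl : start ≤ cs.length
      · have hnin : ¬ (['1'] <:+: cs.drop start) :=
          (PySem.Chars.findFrom_natCast_eq_neg_one_iff cs ['1'] start hsl).mp hpos
        have hjn : j.toNat < cs.length := by omega
        have hget : PySem.List.pyGetD cs j ' ' = cs[j.toNat] :=
          PySem.List.pyGetD_eq_getElem cs ' ' (by omega) (by omega)
        simp only [hget, beq_iff_eq]
        intro hc
        apply hnin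
        have h1 : ['1'] <+: cs.drop j.toNat := (pvPrefixOne cs j.toNat hjn).mpr hc
        have h2 : cs.drop j.toNat <:+ cs.drop start := by
          rw [show j.toNat = start + (j.toNat - start) by omega, ← List.drop_drop]
          exact List.drop_suffix _ _
        exact h1.isInfix.trans h2.isInfix
      · omega
    rw [hfe, List.append_nil]
  | case2 start acc pos hpos ih =>
    intro hacc
    rw [pvWhile]
    rw [dif_neg hpos]
    obtain ⟨h1, h2, h3⟩ := pvFindFacts cs start hpos
    obtain ⟨_, hpre, hmin⟩ := PySem.Chars.findFrom_natCast_spec cs ['1'] start h3 hpos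
    have hpos0 : (0 : Int) ≤ pos := le_trans (by exact_mod_cast Nat.zero_le start) h1
    have hposn : pos = (pos.toNat : Int) := by omega
    -- the filtered range splits as pos :: (filtered range from pos+1)
    have hsplit : (PySem.List.pyRange (start : Int) (cs.length : Int) 1).filter
          (fun j => PySem.List.pyGetD cs j ' ' == '1')
        = pos :: (PySem.List.pyRange ((pos.toNat : Int) + 1) (cs.length : Int) 1).filter
            (fun j => PySem.List.pyGetD cs j ' ' == '1') := by
      rw [PySem.List.pyRange_one_append (start : Int) (pos.toNat : Int) (cs.length : Int)
            (by omega) (by exact_mod_cast le_of_lt h2),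
          List.filter_append]
      have hnone : (PySem.List.pyRange (start : Int) (pos.toNat : Int) 1).filter
          (fun j => PySem.List.pyGetD cs j ' ' == '1') = [] := by
        rw [List.filter_eq_nil_iff]
        intro j hj
        rw [PySem.List.mem_pyRange_one] at hj
        have hjn : j.toNat < cs.length := by omega
        have hget : PySem.List.pyGetD cs j ' ' = cs[j.toNat] :=
          PySem.List.pyGetD_eq_getElem cs ' ' (by omega) (by omega)
        simp only [hget, beq_iff_eq]
        intro hc
        exact hmin j.toNat (by omega) (by omega) ((pvPrefixOne cs j.toNat hjn).mpr hc)
      rw [hnone, List.nil_append,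
          PySem.List.pyRange_one_cons (by exact_mod_cast h2)]
      have hcpos : cs[pos.toNat] = '1' := (pvPrefixOne cs pos.toNat h2).mp hpre
      have hget : PySem.List.pyGetD cs (pos.toNat : Int) ' ' = cs[pos.toNat] := by
        rw [PySem.List.pyGetD_eq_getElem cs ' ' (by omega) (by exact_mod_cast h2)]
        congr 1
      rw [List.filter_cons_of_pos (by
        have hone : PySem.List.pyGetD cs (pos.toNat : Int) ' ' = '1' := by rw [hget]; exact hcpos
        simpa using hone)]
      rw [← hposn]
    rw [hsplit, ih (fun x hx => by
          rw [PySem.Set.mem_add] at hx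
          rcases hx with hx | hx
          · exact lt_of_lt_of_le (hacc x hx) (by omega)
          · subst hx; omega)]
    have hnotmem : pos ∉ acc := fun hm => absurd (hacc pos hm) (by omega)
    have hadd : PySem.Set.add acc pos = acc ++ [pos] := by
      simp [PySem.Set.add, hnotmem]
    rw [hadd, List.append_assoc]
    rfl

theorem c1_c0_spec : Claim_equal_c1_c0 := by
  intro character _
  unfold Spec_c1_c0
  simp only [c1_c0, c1_c0_alt]
  set cs := character.toList with hcs
  rw [pvFoldPartition]
  simp only [List.nil_append]
  -- both c1 components equal the filtered range
  have hB1 : pvWhile cs 0 PySem.Set.empty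
      = (PySem.List.pyRange 0 (cs.length : Int) 1).filter
          (fun j => PySem.List.pyGetD cs j ' ' == '1') := by
    have := pvWhileEq cs 0 PySem.Set.empty (by simp [PySem.Set.empty])
    simpa [PySem.Set.empty] using this
  have hA1 : PySem.Set.ofList ((PySem.List.pyRange 0 (cs.length : Int) 1).filter
          (fun j => PySem.List.pyGetD cs j ' ' == '1'))
      = (PySem.List.pyRange 0 (cs.length : Int) 1).filter
          (fun j => PySem.List.pyGetD cs j ' ' == '1') :=
    PySem.Set.ofList_eq_self_of_nodup _ (pvNodupFilterRange _ _ _)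
  refine Prod.ext ?_ ?_
  · simp only [hB1, hA1]
  -- c0: A's Set.ofList(filter ¬pred) = Set.diff range c1
  simp only [hB1]
  have hA0 : PySem.Set.ofList ((PySem.List.pyRange 0 (cs.length : Int) 1).filter
        (fun i => !(PySem.List.pyGetD cs i ' ' == '1')))
      = (PySem.List.pyRange 0 (cs.length : Int) 1).filter
          (fun i => !(PySem.List.pyGetD cs i ' ' == '1')) :=
    PySem.Set.ofList_eq_self_of_nodup _ (pvNodupFilterRange _ _ _)
  have hsetR : PySem.Set.ofList (PySem.List.pyRange 0 (cs.length : Int) 1)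
      = PySem.List.pyRange 0 (cs.length : Int) 1 :=
    PySem.Set.ofList_eq_self_of_nodup _ (PySem.List.nodup_pyRange_one 0 (cs.length : Int))
  rw [hA0, hsetR]
  show _ = PySem.Set.diff _ ((PySem.List.pyRange 0 (cs.length : Int) 1).filter
      (fun j => PySem.List.pyGetD cs j ' ' == '1'))
  unfold PySem.Set.diff
  refine (List.filter_congr ?_).symm
  intro j hj
  have hmem : PySem.Set.contains ((PySem.List.pyRange 0 (cs.length : Int) 1).filter
        (fun j => PySem.List.pyGetD cs j ' ' == '1')) j
      = (PySem.List.pyGetD cs j ' ' == '1') := by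
    rw [Bool.eq_iff_iff, PySem.Set.contains_iff, List.mem_filter]
    simp [hj]
  rw [hmem]

-- ===== VERDICT (by name: the statement is the Claim_ definition above) =====
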